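-- pv_equiv track=rewrite | github.com/lidyru/join | join.py | outer
-- ===== SOURCE A (Python) =====
-- def outer(inner_table, pre_table2, first_table, outer_keys2, key2):
--     for key in outer_keys2:
--         tmp_dict = dict()
--         tmp_dict[key2] = key
--         for el, el1 in pre_table2.items():
--             if key == el:
--                 for el2 in el1:
--                     tmp_dict.update(el2)
--         for key in first_table[0]:
--             tmp_dict[key] = None
--         inner_table.append(tmp_dict)
--     return inner_table
-- ===== SOURCE B (Python) =====
-- def outer(inner_table, pre_table2, first_table, outer_keys2, key2):
--     # Build a per-key index once: all dicts listed under a key merged into one dict.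
--     index = {}
--     for el, dicts in pre_table2.items():
--         merged = index.setdefault(el, {})
--         for d in dicts:
--             merged.update(d)
--     # One flat pass over the outer keys.
--     for key in outer_keys2:
--         row = {key2: key}
--         row.update(index.get(key, {}))
--         row.update(dict.fromkeys(first_table[0]))
--         inner_table.append(row)
--     return inner_table
-- ===== Notes on version B (the rewrite author's own statement) =====
-- stated objective: faster
-- what changed: B builds a per-key index of pre_table2 once (merging each key's list of dicts in a preprocessing pass) and then fills every output row with a single dict lookup, instead of A's rescan of the whole pre_table2 for every outer key.
import Mathlib
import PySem

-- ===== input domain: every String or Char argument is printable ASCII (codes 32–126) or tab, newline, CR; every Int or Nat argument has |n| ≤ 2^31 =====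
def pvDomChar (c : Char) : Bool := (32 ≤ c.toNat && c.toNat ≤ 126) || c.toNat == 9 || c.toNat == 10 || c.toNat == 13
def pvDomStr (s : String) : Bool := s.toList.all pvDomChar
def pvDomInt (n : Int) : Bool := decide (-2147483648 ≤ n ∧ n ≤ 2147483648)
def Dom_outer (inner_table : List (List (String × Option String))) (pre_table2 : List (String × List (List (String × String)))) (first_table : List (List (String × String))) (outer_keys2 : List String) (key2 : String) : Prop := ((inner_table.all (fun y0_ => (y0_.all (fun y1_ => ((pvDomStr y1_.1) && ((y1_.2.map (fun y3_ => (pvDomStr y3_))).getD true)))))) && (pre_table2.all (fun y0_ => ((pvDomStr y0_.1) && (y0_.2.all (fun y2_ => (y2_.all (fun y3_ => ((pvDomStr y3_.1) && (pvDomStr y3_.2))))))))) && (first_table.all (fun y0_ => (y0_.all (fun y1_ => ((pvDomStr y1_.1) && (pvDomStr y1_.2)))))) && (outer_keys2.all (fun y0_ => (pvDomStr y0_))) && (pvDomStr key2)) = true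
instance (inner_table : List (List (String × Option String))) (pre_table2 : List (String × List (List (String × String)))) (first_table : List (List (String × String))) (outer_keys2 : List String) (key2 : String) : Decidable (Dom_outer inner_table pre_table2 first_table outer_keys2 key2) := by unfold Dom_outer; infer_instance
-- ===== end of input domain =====

-- B builds a per-key merged index of pre_table2 once, then fills each row with a single lookup
-- instead of A's per-key scan of the whole table (objective: alternative/simpler per-row work).
-- Both A and B append the new rows to inner_table in place in Python; the equivalence proved
-- here is about the RETURN value.

-- ===== PORT A =====
def outer (inner_table : List (List (String × Option String))) (pre_table2 : List (String × List (List (String × String)))) (first_table : List (List (String × String))) (outer_keys2 : List String) (key2 : String) : List (List (String × Option String)) :=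
  outer_keys2.foldl (fun acc key =>
    -- tmp_dict = dict(); tmp_dict[key2] = key
    let t : PySem.Dict String (Option String) := PySem.Dict.insert PySem.Dict.empty key2 (some key)
    -- for el, el1 in pre_table2.items(): if key == el: for el2 in el1: tmp_dict.update(el2)
    let t := pre_table2.foldl (fun t p =>
      if key = p.1 then
        p.2.foldl (fun t el2 => PySem.Dict.update t (el2.map (fun kv => (kv.1, some kv.2)))) t
      else t) t
    -- for key in first_table[0]: tmp_dict[key] = None
    -- (first_table[0] raises IndexError when first_table = [] and the loop runs: excluded by Pre_;
    --  headD [] is only a totality guard)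
    let t := (first_table.headD []).foldl (fun t kv => PySem.Dict.insert t kv.1 none) t
    acc ++ [t.items]) inner_table

-- ===== PORT B =====
def outer_alt (inner_table : List (List (String × Option String))) (pre_table2 : List (String × List (List (String × String)))) (first_table : List (List (String × String))) (outer_keys2 : List String) (key2 : String) : List (List (String × Option String)) :=
  -- index = {}; for el, dicts in pre_table2.items(): merged = index.setdefault(el, {}); for d in dicts: merged.update(d)
  -- (setdefault + in-place update of the stored dict = insert back at el's position)
  let index : PySem.Dict String (PySem.Dict String String) :=
    pre_table2.foldl (fun idx p =>
      let merged := (PySem.Dict.get? idx p.1).getD PySem.Dict.empty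
      PySem.Dict.insert idx p.1 (p.2.foldl (fun m d => PySem.Dict.update m d) merged)) PySem.Dict.empty
  outer_keys2.foldl (fun acc key =>
    -- row = {key2: key}
    let row : PySem.Dict String (Option String) := PySem.Dict.insert PySem.Dict.empty key2 (some key)
    -- row.update(index.get(key, {}))
    let row := PySem.Dict.update row ((((PySem.Dict.get? index key).getD PySem.Dict.empty).items).map (fun kv => (kv.1, some kv.2)))
    -- row.update(dict.fromkeys(first_table[0]))  (update with each key of first_table[0] mapped to None;
    --  headD [] is only a totality guard, see Pre_)
    let row := PySem.Dict.update row ((first_table.headD []).map (fun kv => (kv.1, (none : Option String))))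
    acc ++ [row.items]) inner_table

-- ===== PRECONDITION & SPEC =====
-- A raises IndexError on first_table[0] exactly when outer_keys2 is nonempty and first_table is empty.
def Pre_outer (inner_table : List (List (String × Option String))) (pre_table2 : List (String × List (List (String × String)))) (first_table : List (List (String × String))) (outer_keys2 : List String) (key2 : String) : Prop :=
  outer_keys2 = [] ∨ first_table ≠ []
instance (inner_table : List (List (String × Option String))) (pre_table2 : List (String × List (List (String × String)))) (first_table : List (List (String × String))) (outer_keys2 : List String) (key2 : String) : Decidable (Pre_outer inner_table pre_table2 first_table outer_keys2 key2) := by unfold Pre_outer; infer_instance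
def pvWitness_outer : (List (List (String × Option String))) × (List (String × List (List (String × String)))) × (List (List (String × String))) × List String × String :=
  ([[("z", none)]], [("a", [[("x", "1")], [("y", "2")]]), ("b", [[("x", "3")]])], [[("x", "0"), ("w", "9")]], ["a", "b", "c", "a"], "k")

def Spec_outer (inner_table : List (List (String × Option String))) (pre_table2 : List (String × List (List (String × String)))) (first_table : List (List (String × String))) (outer_keys2 : List String) (key2 : String) (out : List (List (String × Option String))) : Prop := out = outer_alt inner_table pre_table2 first_table outer_keys2 key2
instance (inner_table : List (List (String × Option String))) (pre_table2 : List (String × List (List (String × String)))) (first_table : List (List (String × String))) (outer_keys2 : List String) (key2 : String) (out : List (List (String × Option String))) : Decidable (Spec_outer inner_table pre_table2 first_table outer_keys2 key2 out) := by unfold Spec_outer; infer_instance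

-- ===== CLAIM (what is proved, stated in full; the proofs are below) =====
def Claim_equal_outer : Prop := ∀ (inner_table : List (List (String × Option String))) (pre_table2 : List (String × List (List (String × String)))) (first_table : List (List (String × String))) (outer_keys2 : List String) (key2 : String), Dom_outer inner_table pre_table2 first_table outer_keys2 key2 → Pre_outer inner_table pre_table2 first_table outer_keys2 key2 → Spec_outer inner_table pre_table2 first_table outer_keys2 key2 (outer inner_table pre_table2 first_table outer_keys2 key2)


-- ===== LEMMAS AND PROOFS =====

-- one .update step on the Option-valued row: insert kv with value some kv.2
def pvIns (t : PySem.Dict String (Option String)) (kv : String × String) : PySem.Dict String (Option String) :=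
  t.insert kv.1 (some kv.2)

-- overlay a String-valued dict onto the Option-valued row (row.update(m))
def pvUpd (t : PySem.Dict String (Option String)) (m : PySem.Dict String String) : PySem.Dict String (Option String) :=
  m.items.foldl pvIns t

theorem pvUpd_map_lift (t : PySem.Dict String (Option String)) (l : List (String × String)) :
    PySem.Dict.update t (l.map (fun kv => (kv.1, some kv.2))) = l.foldl pvIns t := by
  rw [PySem.Dict.update, List.foldl_map]; rfl

theorem pvUpd_map_none (t : PySem.Dict String (Option String)) (l : List (String × String)) :
    PySem.Dict.update t (l.map (fun kv => (kv.1, (none : Option String))))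
      = l.foldl (fun t kv => PySem.Dict.insert t kv.1 none) t := by
  rw [PySem.Dict.update, List.foldl_map]

-- two inserts at distinct keys commute as DICTS when the first key is already present
theorem pv_ins_comm {ν : Type} (t : PySem.Dict String ν) (k p1 : String) (b x : ν)
    (hk : t.contains k = true) (hne : p1 ≠ k) :
    (t.insert p1 x).insert k b = (t.insert k b).insert p1 x := by
  apply PySem.Dict.ext
  by_cases hp : t.contains p1 = true
  · rw [PySem.Dict.items_insert_of_contains _ b (by simp [PySem.Dict.contains_insert, hk]),
        PySem.Dict.items_insert_of_contains _ x hp,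
        PySem.Dict.items_insert_of_contains _ x (by simp [PySem.Dict.contains_insert, hp]),
        PySem.Dict.items_insert_of_contains _ b hk]
    simp only [List.map_map]
    apply List.map_congr_left
    intro pr _
    simp only [Function.comp]
    by_cases h1 : pr.1 = p1 <;> by_cases h2 : pr.1 = k <;>
      simp [h1, h2, hne, Ne.symm hne]
  · rw [PySem.Dict.items_insert_of_contains _ b (by simp [PySem.Dict.contains_insert, hk]),
        PySem.Dict.items_insert_of_not_contains _ x (by simpa using hp),
        PySem.Dict.items_insert_of_not_contains _ x
          (by simp [PySem.Dict.contains_insert, hne]; simpa using hp),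
        PySem.Dict.items_insert_of_contains _ b hk]
    simp [List.map_append, hne]

-- inserting a key no later pair touches can be pulled inside the fold when the key is present
theorem pv_fold_ins_insert_comm (L : List (String × String)) (k : String) (b : Option String) :
    ∀ t : PySem.Dict String (Option String), (∀ p ∈ L, p.1 ≠ k) → t.contains k = true →
    (L.foldl pvIns t).insert k b = L.foldl pvIns (t.insert k b) := by
  induction L with
  | nil => intro t _ _; rfl
  | cons a L ih =>
    intro t h hk
    have ha : a.1 ≠ k := h a (by simp)
    simp only [List.foldl_cons]
    rw [ih (pvIns t a) (fun p hp => h p (by simp [hp]))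
        (by simp [pvIns, PySem.Dict.contains_insert, hk])]
    show List.foldl pvIns ((t.insert a.1 (some a.2)).insert k b) L = _
    rw [pv_ins_comm t k a.1 b (some a.2) hk ha]
    rfl

-- CORE: the row got by overlaying (L-as-a-dict).insert k v = overlay L, then insert (k, some v)
theorem pv_list_core (k v : String) (L : List (String × String)) :
    ∀ t : PySem.Dict String (Option String), (L.map Prod.fst).Nodup →
    ((PySem.Dict.mk L).insert k v).items.foldl pvIns t = (L.foldl pvIns t).insert k (some v) := by
  induction L with
  | nil =>
    intro t _
    rw [PySem.Dict.items_insert_of_not_contains _ _ (by simp [PySem.Dict.contains_mk])]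
    rfl
  | cons a L ih =>
    intro t hnd
    rw [List.map_cons] at hnd
    have hmem : a.1 ∉ L.map Prod.fst := (List.nodup_cons.mp hnd).1
    have hndL : (L.map Prod.fst).Nodup := (List.nodup_cons.mp hnd).2
    have h1 : (PySem.Dict.mk (a :: L)).contains k = (a.1 == k || (PySem.Dict.mk L).contains k) := by
      simp [PySem.Dict.contains_mk]
    by_cases hak : a.1 = k
    · have hall : ∀ p ∈ L, p.1 ≠ k := by
        intro p hp hpk
        exact hmem (hak ▸ hpk ▸ List.mem_map_of_mem hp)
      rw [PySem.Dict.items_insert_of_contains _ v (by rw [h1]; simp [hak])]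
      have hmap : List.map (fun p => if (p.1 == k) = true then (k, v) else p) L = L := by
        have hid : ∀ p ∈ L, (fun p => if (p.1 == k) = true then (k, v) else p) p = id p := by
          intro p hp; simp [hall p hp]
        rw [List.map_congr_left hid, List.map_id]
      rw [List.map_cons, hmap, if_pos (by simp [hak])]
      rw [List.foldl_cons, List.foldl_cons,
        pv_fold_ins_insert_comm L k (some v) (pvIns t a) hall
          (by simp [pvIns, hak])]
      have h2 : (pvIns t a).insert k (some v) = pvIns t (k, v) := by
        simp only [pvIns]
        rw [hak, PySem.Dict.insert_insert_self]
      rw [h2]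
    · have hitems : ((PySem.Dict.mk (a :: L)).insert k v).items
          = a :: ((PySem.Dict.mk L).insert k v).items := by
        by_cases hc : (PySem.Dict.mk L).contains k = true
        · rw [PySem.Dict.items_insert_of_contains _ v (by rw [h1, hc]; simp),
            PySem.Dict.items_insert_of_contains _ v hc]
          simp [hak]
        · rw [PySem.Dict.items_insert_of_not_contains _ v
              (by rw [h1, eq_false_of_ne_true hc]; simp [hak]),
            PySem.Dict.items_insert_of_not_contains _ v (eq_false_of_ne_true hc)]
          rfl
      rw [hitems, List.foldl_cons, List.foldl_cons, ih (pvIns t a) hndL]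

-- overlaying m.insert k v, at the Dict level
theorem pv_upd_insert (m : PySem.Dict String String) (k v : String)
    (hnd : m.keys.Nodup) (t : PySem.Dict String (Option String)) :
    pvUpd t (m.insert k v) = (pvUpd t m).insert k (some v) := by
  obtain ⟨L⟩ := m
  exact pv_list_core k v L t (by simpa [PySem.Dict.keys] using hnd)

-- one row-side .update fold = overlaying the .update-merged dict
theorem pv_upd_update (d : List (String × String)) :
    ∀ (m : PySem.Dict String String) (t : PySem.Dict String (Option String)), m.keys.Nodup →
    d.foldl pvIns (pvUpd t m) = pvUpd t (PySem.Dict.update m d) := by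
  induction d with
  | nil => intro m t _; rfl
  | cons kv d ih =>
    intro m t h
    rw [List.foldl_cons]
    show d.foldl pvIns ((pvUpd t m).insert kv.1 (some kv.2)) = _
    rw [← pv_upd_insert m kv.1 kv.2 h t, ih (m.insert kv.1 kv.2) t (PySem.Dict.nodup_keys_insert _ _ _ h)]
    rfl

theorem pv_nodup_foldl_update (ds : List (List (String × String))) :
    ∀ m : PySem.Dict String String, m.keys.Nodup →
    (ds.foldl (fun m d => PySem.Dict.update m d) m).keys.Nodup := by
  induction ds with
  | nil => intro m h; exact h
  | cons d ds ih => intro m h; exact ih _ (PySem.Dict.nodup_keys_update m d h)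

-- the whole merge loop for one table entry, at the Dict level
theorem pv_upd_foldl_update (ds : List (List (String × String))) :
    ∀ (m : PySem.Dict String String) (t : PySem.Dict String (Option String)), m.keys.Nodup →
    ds.foldl (fun t d => d.foldl pvIns t) (pvUpd t m) =
      pvUpd t (ds.foldl (fun m d => PySem.Dict.update m d) m) := by
  induction ds with
  | nil => intro m t _; rfl
  | cons d ds ih =>
    intro m t h
    rw [List.foldl_cons, List.foldl_cons, pv_upd_update d m t h,
      ih _ t (PySem.Dict.nodup_keys_update m d h)]

-- the dict stored under any key of a nodup-valued index has nodup keys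
theorem pv_getD_values_nodup (idx : PySem.Dict String (PySem.Dict String String)) (k : String)
    (h : ∀ m ∈ idx.values, m.keys.Nodup) :
    ((PySem.Dict.get? idx k).getD PySem.Dict.empty).keys.Nodup := by
  cases hg : PySem.Dict.get? idx k with
  | none => simp [PySem.Dict.keys_empty]
  | some m =>
    have : m ∈ idx.values := by
      have := PySem.Dict.mem_items_of_get?_eq_some idx hg
      exact List.mem_map_of_mem this
    simpa using h m this

-- MAIN INVARIANT: A's scan of the remaining table, started from a row already overlaid with the
-- index entry built so far, equals overlaying the final index entry.
theorem pv_scan_eq_index (key : String) (pre : List (String × List (List (String × String)))) :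
    ∀ (idx : PySem.Dict String (PySem.Dict String String)) (t : PySem.Dict String (Option String)),
    (∀ m ∈ idx.values, m.keys.Nodup) →
    pre.foldl (fun t p =>
        if key = p.1 then p.2.foldl (fun t el2 => el2.foldl pvIns t) t else t)
      (pvUpd t ((PySem.Dict.get? idx key).getD PySem.Dict.empty))
    = pvUpd t ((PySem.Dict.get?
        (pre.foldl (fun idx p =>
          PySem.Dict.insert idx p.1
            (p.2.foldl (fun m d => PySem.Dict.update m d) ((PySem.Dict.get? idx p.1).getD PySem.Dict.empty))) idx)
        key).getD PySem.Dict.empty) := by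
  induction pre with
  | nil => intro idx t _; rfl
  | cons p pre ih =>
    intro idx t h
    have hmp : ((PySem.Dict.get? idx p.1).getD PySem.Dict.empty).keys.Nodup :=
      pv_getD_values_nodup idx p.1 h
    have hinv' : ∀ m ∈ (PySem.Dict.insert idx p.1
        (p.2.foldl (fun m d => PySem.Dict.update m d)
          ((PySem.Dict.get? idx p.1).getD PySem.Dict.empty))).values, m.keys.Nodup := by
      intro m hm
      rcases PySem.Dict.mem_values_insert _ _ _ _ hm with rfl | hm2
      · exact pv_nodup_foldl_update p.2 _ hmp
      · exact h m hm2
    rw [List.foldl_cons, List.foldl_cons]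
    by_cases hkey : key = p.1
    · rw [if_pos hkey]
      have hstep : p.2.foldl (fun t el2 => el2.foldl pvIns t)
          (pvUpd t ((PySem.Dict.get? idx key).getD PySem.Dict.empty))
          = pvUpd t ((PySem.Dict.get? (PySem.Dict.insert idx p.1
              (p.2.foldl (fun m d => PySem.Dict.update m d)
                ((PySem.Dict.get? idx p.1).getD PySem.Dict.empty))) key).getD PySem.Dict.empty) := by
        rw [hkey, PySem.Dict.get?_insert_self]
        exact pv_upd_foldl_update p.2 _ t hmp
      rw [hstep]
      exact ih _ t hinv'
    · rw [if_neg hkey]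
      have hget : PySem.Dict.get? idx key = PySem.Dict.get? (PySem.Dict.insert idx p.1
          (p.2.foldl (fun m d => PySem.Dict.update m d)
            ((PySem.Dict.get? idx p.1).getD PySem.Dict.empty))) key :=
        (PySem.Dict.get?_insert_of_ne _ _ hkey).symm
      rw [hget]
      exact ih _ t hinv'

-- ===== VERDICT (by name: the statement is the Claim_ definition above) =====
theorem outer_spec : Claim_equal_outer := by
  intro inner_table pre_table2 first_table outer_keys2 key2 _ _
  unfold Spec_outer outer outer_alt
  congr 1
  funext acc key
  simp only [pvUpd_map_lift, pvUpd_map_none]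
  congr 1
  have hstart : (PySem.Dict.insert PySem.Dict.empty key2 (some key) : PySem.Dict String (Option String))
      = pvUpd (PySem.Dict.insert PySem.Dict.empty key2 (some key))
          ((PySem.Dict.get? (PySem.Dict.empty : PySem.Dict String (PySem.Dict String String)) key).getD
            PySem.Dict.empty) := rfl
  rw [hstart, pv_scan_eq_index key pre_table2 PySem.Dict.empty _ (by intro m hm; simp [PySem.Dict.values, PySem.Dict.empty] at hm)]
  rfl
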